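-- pv_equiv track=rewrite | github.com/teamteamdev/ugractf-2024-school | tasks/skinparadox/keygen.py | generate_ucucuga_key
-- ===== SOURCE A (Python) =====
-- def generate_ucucuga_key(token, purplesyringa_key):
--     ALPHABET = "0123456789abcdefghijklmnopqrstuvwxyzABCDEFGHIJKLMNOPQRSTUVWXYZ_-"
--     for c in purplesyringa_key:
--         i = c % len(token)
--         tmp = token[i:] + token[:i]
--         token = ""
--         for i in range(len(tmp)):
--             token += ALPHABET[(sum(map(ord, tmp[:i + 1])) + i) % len(ALPHABET)]
--     return token
-- ===== SOURCE B (Python) =====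
-- def generate_ucucuga_key(token, purplesyringa_key):
--     ALPHABET = "0123456789abcdefghijklmnopqrstuvwxyzABCDEFGHIJKLMNOPQRSTUVWXYZ_-"
--     n = len(token)
--     for c in purplesyringa_key:
--         i = c % n
--         tmp = token[i:] + token[:i]
--         out = []
--         s = 0
--         for j, ch in enumerate(tmp):
--             s += ord(ch)
--             out.append(ALPHABET[(s + j) % 64])
--         token = "".join(out)
--     return token
-- ===== Notes on version B (the rewrite author's own statement) =====
-- stated objective: faster
-- what changed: B maintains a running prefix sum of character codes (and builds each round's string as a list joined once) instead of re-summing the whole prefix and re-concatenating the string at every position, turning each round from quadratic to linear.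
import Mathlib
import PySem

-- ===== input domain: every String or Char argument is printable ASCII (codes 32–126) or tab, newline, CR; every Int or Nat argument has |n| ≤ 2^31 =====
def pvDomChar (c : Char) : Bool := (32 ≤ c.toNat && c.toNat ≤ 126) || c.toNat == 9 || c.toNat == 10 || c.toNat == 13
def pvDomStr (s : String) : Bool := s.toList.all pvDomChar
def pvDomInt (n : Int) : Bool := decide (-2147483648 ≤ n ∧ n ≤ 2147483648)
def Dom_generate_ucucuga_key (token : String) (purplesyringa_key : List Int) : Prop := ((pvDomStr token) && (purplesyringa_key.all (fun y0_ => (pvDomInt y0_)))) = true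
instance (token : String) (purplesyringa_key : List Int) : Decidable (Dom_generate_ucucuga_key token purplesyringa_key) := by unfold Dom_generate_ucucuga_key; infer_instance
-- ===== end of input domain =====

-- B keeps a running prefix sum of character codes per round (O(k·n) instead of A's O(k·n²)); the measured objective is speed.

-- ===== PORT A =====
def pvAlphabet : List Char := "0123456789abcdefghijklmnopqrstuvwxyzABCDEFGHIJKLMNOPQRSTUVWXYZ_-".toList

-- one pass of A's outer loop: rotate, then rebuild token re-summing each prefix
def pvStepA (tok : List Char) (c : Int) : List Char :=
  let i := PySem.Int.mod c (tok.length : Int)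
  let tmp := PySem.List.slice tok (some i) none ++ PySem.List.slice tok none (some i)
  (PySem.List.pyRange 0 (tmp.length : Int) 1).foldl
    (fun acc j =>
      acc ++ [PySem.List.pyGetD pvAlphabet
        (PySem.Int.mod (((PySem.List.slice tmp none (some (j + 1))).map (fun ch => (ch.toNat : Int))).sum + j)
          (pvAlphabet.length : Int)) ' '])
    []

def generate_ucucuga_key (token : String) (purplesyringa_key : List Int) : String :=
  String.ofList (purplesyringa_key.foldl pvStepA token.toList)

-- ===== PORT B =====
-- one pass of B's outer loop: rotate, then single scan with running sum s and an output list
def pvStepB (n : Int) (tok : List Char) (c : Int) : List Char :=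
  let i := PySem.Int.mod c n
  let tmp := PySem.List.slice tok (some i) none ++ PySem.List.slice tok none (some i)
  ((PySem.List.enumerate tmp 0).foldl
    (fun st p =>
      let s := st.1 + (p.2.toNat : Int)
      (s, st.2 ++ [PySem.List.pyGetD pvAlphabet (PySem.Int.mod (s + p.1) 64) ' ']))
    ((0 : Int), ([] : List Char))).2

def generate_ucucuga_key_alt (token : String) (purplesyringa_key : List Int) : String :=
  String.ofList (purplesyringa_key.foldl (pvStepB (token.toList.length : Int)) token.toList)

-- ===== PRECONDITION & SPEC =====
-- Pre_ excludes exactly the inputs where Python A raises ZeroDivisionError (c % len(token) with an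
-- empty token and a nonempty key); B raises there too.
def Pre_generate_ucucuga_key (token : String) (purplesyringa_key : List Int) : Prop :=
  purplesyringa_key = [] ∨ token ≠ ""
instance (token : String) (purplesyringa_key : List Int) : Decidable (Pre_generate_ucucuga_key token purplesyringa_key) := by unfold Pre_generate_ucucuga_key; infer_instance

def pvWitness_generate_ucucuga_key : String × List Int := ("ab", [3])

def Spec_generate_ucucuga_key (token : String) (purplesyringa_key : List Int) (out : String) : Prop := out = generate_ucucuga_key_alt token purplesyringa_key
instance (token : String) (purplesyringa_key : List Int) (out : String) : Decidable (Spec_generate_ucucuga_key token purplesyringa_key out) := by unfold Spec_generate_ucucuga_key; infer_instance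

-- ===== CLAIM (what is proved, stated in full; the proofs are below) =====
def Claim_equal_generate_ucucuga_key : Prop := ∀ (token : String) (purplesyringa_key : List Int), Dom_generate_ucucuga_key token purplesyringa_key → Pre_generate_ucucuga_key token purplesyringa_key → Spec_generate_ucucuga_key token purplesyringa_key (generate_ucucuga_key token purplesyringa_key)

-- ===== LEMMAS AND PROOFS =====

-- sum of character codes of a prefix
def pvOrdSum (l : List Char) : Int := (l.map (fun ch => (ch.toNat : Int))).sum

-- B's inner fold, characterised (running sum s, start index k)
lemma pvStepB_fold :
    ∀ (rest : List Char) (k : Nat) (s : Int) (acc : List Char),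
    ((PySem.List.enumerate rest (k : Int)).foldl
      (fun st p =>
        let s := st.1 + (p.2.toNat : Int)
        (s, st.2 ++ [PySem.List.pyGetD pvAlphabet (PySem.Int.mod (s + p.1) 64) ' ']))
      (s, acc)).2
      = acc ++ (List.range rest.length).map
          (fun t => PySem.List.pyGetD pvAlphabet
            (PySem.Int.mod (s + pvOrdSum (rest.take (t + 1)) + ((k : Int) + t)) 64) ' ') := by
  intro rest
  induction rest with
  | nil => intro k s acc; simp [PySem.List.enumerate_nil]
  | cons ch rest ih =>
    intro k s acc
    rw [PySem.List.enumerate_cons, List.foldl_cons]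
    have hk : ((k : Int) + 1) = ((k + 1 : Nat) : Int) := by push_cast; ring
    simp only [hk, ih (k + 1)]
    simp only [List.length_cons, List.range_succ_eq_map, List.map_cons, List.map_map]
    rw [List.append_assoc]
    congr 1
    rw [List.singleton_append]
    show _ :: _ = _ :: _
    refine List.cons_eq_cons.mpr ⟨?_, ?_⟩
    · simp only [pvOrdSum, List.take_succ_cons, List.take_zero, List.map_cons, List.map_nil,
        List.sum_cons, List.sum_nil]
      congr 2
    · apply List.map_congr_left
      intro t _
      simp only [Function.comp_apply, Nat.succ_eq_add_one, pvOrdSum, List.take_succ_cons,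
        List.map_cons, List.sum_cons]
      congr 2
      push_cast
      ring

lemma pvStep_eq (tok : List Char) (c : Int) : pvStepA tok c = pvStepB (tok.length : Int) tok c := by
  unfold pvStepA pvStepB
  rw [show ((0 : Int)) = ((0 : Nat) : Int) from rfl, pvStepB_fold]
  rw [PySem.List.foldl_append_singleton_eq_map, PySem.List.pyRange_one]
  simp only [List.map_map, List.nil_append]
  apply List.map_congr_left
  intro t _
  simp only [Function.comp, Nat.cast_zero, zero_add]
  have h1 : ((t : Int) + 1) = (((t + 1 : Nat)) : Int) := by push_cast; ring
  rw [h1, PySem.List.slice_to_natCast]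
  have h2 : (pvAlphabet.length : Int) = 64 := by decide
  rw [h2]
  congr 2

lemma pvStepA_length (tok : List Char) (c : Int) : (pvStepA tok c).length = tok.length := by
  unfold pvStepA
  rw [PySem.List.foldl_append_singleton_eq_map, PySem.List.pyRange_one]
  simp only [List.map_map, List.nil_append, List.length_map, List.length_range, Int.sub_zero,
    Int.toNat_natCast, List.length_append]
  rcases Nat.eq_zero_or_pos tok.length with h | h
  · have htok : tok = [] := List.length_eq_zero_iff.mp h
    subst htok
    simp [PySem.List.slice]
  · have h0 : (0 : Int) ≤ PySem.Int.mod c (tok.length : Int) :=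
      PySem.Int.mod_nonneg c (by exact_mod_cast h)
    have hlt : PySem.Int.mod c (tok.length : Int) < (tok.length : Int) :=
      PySem.Int.mod_lt c (by exact_mod_cast h)
    rw [PySem.List.slice_from _ h0, PySem.List.slice_to _ h0]
    simp only [List.length_drop, List.length_take]
    omega

lemma pvFold_eq (key : List Int) : ∀ (tok : List Char) (n : Int), (tok.length : Int) = n →
    key.foldl pvStepA tok = key.foldl (pvStepB n) tok := by
  induction key with
  | nil => intro tok n _; rfl
  | cons c key ih =>
    intro tok n h
    simp only [List.foldl_cons]
    have hs : pvStepA tok c = pvStepB n tok c := by rw [← h]; exact pvStep_eq tok c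
    have hl : ((pvStepB n tok c).length : Int) = n := by
      rw [← hs, pvStepA_length tok c]; exact h
    rw [hs, ih (pvStepB n tok c) n hl]

-- ===== VERDICT (by name: the statement is the Claim_ definition above) =====
theorem generate_ucucuga_key_spec : Claim_equal_generate_ucucuga_key := by
  intro token key _ _
  show generate_ucucuga_key token key = generate_ucucuga_key_alt token key
  unfold generate_ucucuga_key generate_ucucuga_key_alt
  rw [pvFold_eq key token.toList (token.toList.length : Int) rfl]
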